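-- pv_equiv track=rewrite | github.com/Shahid-724/learning_dsa | 5_valid_ss.py | countValidSubstrings
-- ===== SOURCE A (Python) =====
-- def countValidSubstrings(S, minLength, maxLength):
--     def is_valid(substring):
--         for i in range(len(substring) - 1):
--             if substring[i] == substring[i + 1]:
--                 return False
--         return True
--
--     n = len(S)
--     count = 0
--
--     for length in range(minLength, maxLength + 1):
--         for i in range(n - length + 1):
--             substring = S[i:i + length]
--             if is_valid(substring):
--                 count += 1
--
--     return count
-- ===== SOURCE B (Python) =====
-- def countValidSubstrings(S, minLength, maxLength):
--     # runs[i] = length of the longest substring starting at i whose adjacent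
--     # characters are all distinct; a start i then contributes one valid substring
--     # for every length L with max(minLength, 1) <= L <= min(maxLength, runs[i]).
--     n = len(S)
--     runs = [1] * n
--     for i in range(n - 2, -1, -1):
--         if S[i] != S[i + 1]:
--             runs[i] = runs[i + 1] + 1
--     lo = max(minLength, 1)
--     count = 0
--     for r in runs:
--         hi = min(maxLength, r)
--         if lo <= hi:
--             count += hi - lo + 1
--     return count
-- ===== Notes on version B (the rewrite author's own statement) =====
-- stated objective: alternative
-- what changed: Instead of enumerating every substring of every length and re-scanning it for equal adjacent characters, B computes in one backward pass the maximal distinct-adjacent run length at each start and adds, per start, the number of requested lengths that fit, arithmetically (a single run-length pass instead of per-substring re-scans).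
-- intended difference: For minLength <= 0 (with minLength <= maxLength) A also counts 'substrings' of non-positive length - n+1 empty slices per such length plus, for negative lengths, slices arising from Python's negative-slice-index wraparound - while B counts only substrings of positive length, the intended meaning; A's value is always strictly larger there. — e.g. on countValidSubstrings("ab", 0, 1): A returns 5, B returns 2
import Mathlib
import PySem

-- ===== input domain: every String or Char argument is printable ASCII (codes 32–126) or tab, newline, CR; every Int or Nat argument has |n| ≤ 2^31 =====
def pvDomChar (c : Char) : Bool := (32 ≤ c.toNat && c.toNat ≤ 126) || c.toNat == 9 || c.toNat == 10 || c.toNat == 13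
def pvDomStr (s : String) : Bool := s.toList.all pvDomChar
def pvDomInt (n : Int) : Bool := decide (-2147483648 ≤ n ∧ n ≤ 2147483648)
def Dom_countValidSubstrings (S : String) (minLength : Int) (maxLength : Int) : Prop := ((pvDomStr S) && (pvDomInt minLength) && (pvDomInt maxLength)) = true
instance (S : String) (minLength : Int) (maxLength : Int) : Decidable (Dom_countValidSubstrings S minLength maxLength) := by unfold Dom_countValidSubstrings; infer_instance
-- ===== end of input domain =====

-- B replaces A's exhaustive substring enumeration by a single backward run-length pass
-- plus per-start arithmetic; for minLength ≤ 0 the results differ, see D_ below.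


-- ===== PORT A =====
-- is_valid(substring): scan adjacent pairs, False on an equal pair
def pvIsValid (cs : List Char) : Bool :=
  (PySem.List.pyRange 0 (PySem.List.len cs - 1)).all
    (fun i => !(PySem.List.pyGet? cs i == PySem.List.pyGet? cs (i + 1)))

def countValidSubstrings (S : String) (minLength : Int) (maxLength : Int) : Int :=
  let n : Int := PySem.Str.len S
  (PySem.List.pyRange minLength (maxLength + 1)).foldl
    (fun count length =>
      (PySem.List.pyRange 0 (n - length + 1)).foldl
        (fun count i =>
          if pvIsValid (PySem.List.slice S.toList (some i) (some (i + length))) then count + 1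
          else count)
        count)
    0

-- ===== PORT B =====
-- runs[i] = runs[i+1] + 1 if S[i] ≠ S[i+1] else 1, filled right to left (exact port of Source B's backward loop)
def pvRuns : List Char → List Nat
  | [] => []
  | [_] => [1]
  | a :: b :: t =>
      let rs := pvRuns (b :: t)
      (if a ≠ b then rs.headI + 1 else 1) :: rs

def countValidSubstrings_alt (S : String) (minLength : Int) (maxLength : Int) : Int :=
  let lo : Int := max minLength 1
  (pvRuns S.toList).foldl
    (fun (count : Int) (r : Nat) =>
      let hi : Int := min maxLength (r : Int)
      if lo ≤ hi then count + (hi - lo + 1) else count)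
    0

-- ===== PRECONDITION & SPEC =====
-- For minLength ≤ 0 (with minLength ≤ maxLength) A also counts 'substrings' of non-positive length —
-- n+1 empty slices per such length plus, for negative lengths, slices arising from Python's
-- negative-slice-index wraparound — while B counts only substrings of positive length, the intended
-- meaning; A's value is always strictly larger there.
def D_countValidSubstrings (S : String) (minLength : Int) (maxLength : Int) : Prop :=
  minLength ≤ 0 ∧ minLength ≤ maxLength
instance (S : String) (minLength : Int) (maxLength : Int) : Decidable (D_countValidSubstrings S minLength maxLength) := by unfold D_countValidSubstrings; infer_instance

def Spec_countValidSubstrings (S : String) (minLength : Int) (maxLength : Int) (out : Int) : Prop := ¬ D_countValidSubstrings S minLength maxLength → out = countValidSubstrings_alt S minLength maxLength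
instance (S : String) (minLength : Int) (maxLength : Int) (out : Int) : Decidable (Spec_countValidSubstrings S minLength maxLength out) := by unfold Spec_countValidSubstrings; infer_instance

def pvDiffWitness_countValidSubstrings : String × Int × Int := ("ab", 0, 1)
def pvDiffWitnessOut_countValidSubstrings : Int × Int := (5, 2)

-- ===== CLAIM (what is proved, stated in full; the proofs are below) =====
def Claim_unchanged_countValidSubstrings : Prop := ∀ (S : String) (minLength : Int) (maxLength : Int), Dom_countValidSubstrings S minLength maxLength → Spec_countValidSubstrings S minLength maxLength (countValidSubstrings S minLength maxLength)
def Claim_changed_countValidSubstrings : Prop := Dom_countValidSubstrings (pvDiffWitness_countValidSubstrings.1) (pvDiffWitness_countValidSubstrings.2.1) (pvDiffWitness_countValidSubstrings.2.2) ∧ D_countValidSubstrings (pvDiffWitness_countValidSubstrings.1) (pvDiffWitness_countValidSubstrings.2.1) (pvDiffWitness_countValidSubstrings.2.2) ∧ countValidSubstrings (pvDiffWitness_countValidSubstrings.1) (pvDiffWitness_countValidSubstrings.2.1) (pvDiffWitness_countValidSubstrings.2.2) = pvDiffWitnessOut_countValidSubstrings.1 ∧ countValidSubstrings_alt (pvDiffWitness_countValidSubstrings.1)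 (pvDiffWitness_countValidSubstrings.2.1) (pvDiffWitness_countValidSubstrings.2.2) = pvDiffWitnessOut_countValidSubstrings.2 ∧ pvDiffWitnessOut_countValidSubstrings.1 ≠ pvDiffWitnessOut_countValidSubstrings.2
def Claim_exact_countValidSubstrings : Prop := ∀ (S : String) (minLength : Int) (maxLength : Int), Dom_countValidSubstrings S minLength maxLength → D_countValidSubstrings S minLength maxLength → countValidSubstrings S minLength maxLength ≠ countValidSubstrings_alt S minLength maxLength


-- ===== LEMMAS AND PROOFS =====

-- A's validity test is exactly "no two adjacent characters are equal" (IsChain (≠)).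
theorem pvIsValid_iff (cs : List Char) :
    pvIsValid cs = true ↔ List.IsChain (· ≠ ·) cs := by
  unfold pvIsValid
  rw [List.all_eq_true, List.isChain_iff_getElem]
  constructor
  · intro h i hi
    have hmem : (i : Int) ∈ PySem.List.pyRange 0 (PySem.List.len cs - 1) := by
      rw [PySem.List.mem_pyRange_one, PySem.List.len_eq]; omega
    have := h _ hmem
    rw [PySem.List.pyGet?_eq_some_getElem cs (by omega) (by exact_mod_cast by omega),
        PySem.List.pyGet?_eq_some_getElem cs (by omega) (by exact_mod_cast by omega)] at this
    simp only [Bool.not_eq_eq_eq_not, Bool.not_true, beq_eq_false_iff_ne, ne_eq,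
      Option.some.injEq] at this
    intro hEq
    apply this
    convert hEq using 2
  · intro h i hmem
    rw [PySem.List.mem_pyRange_one, PySem.List.len_eq] at hmem
    rw [PySem.List.pyGet?_eq_some_getElem cs (by omega) (by omega),
        PySem.List.pyGet?_eq_some_getElem cs (by omega) (by omega)]
    simp only [Bool.not_eq_eq_eq_not, Bool.not_true, beq_eq_false_iff_ne, ne_eq,
      Option.some.injEq]
    have := h i.toNat (by omega)
    intro hEq
    apply this
    convert hEq using 2 <;> omega

theorem pvRuns_cons_cons (a b : Char) (t : List Char) :
    pvRuns (a :: b :: t) =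
      (if a ≠ b then (pvRuns (b :: t)).headI + 1 else 1) :: pvRuns (b :: t) := rfl

-- pvRuns (a :: l) always has the shape head :: pvRuns l
theorem pvRuns_cons_eq (a : Char) (l : List Char) :
    pvRuns (a :: l) = (pvRuns (a :: l)).headI :: pvRuns l := by
  cases l with
  | nil => rfl
  | cons b t => rw [pvRuns_cons_cons]; rfl

theorem pvRuns_headI_le (l : List Char) : (pvRuns l).headI ≤ l.length := by
  induction l using pvRuns.induct with
  | case1 => simp [pvRuns]
  | case2 => simp [pvRuns]
  | case3 a b t ih =>
    rw [pvRuns_cons_cons]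
    by_cases hab : a = b <;> simp only [hab, ne_eq, not_true_eq_false, not_false_eq_true,
      if_true, if_false, List.headI_cons, List.length_cons] at * <;> omega

-- characterisation of the head run value: the run at the head is ≥ k iff the first k
-- characters exist and form a chain of distinct adjacent characters
theorem pvRuns_head_spec (l : List Char) (k : Nat) (hk : 1 ≤ k) :
    k ≤ (pvRuns l).headI ↔ k ≤ l.length ∧ List.IsChain (· ≠ ·) (l.take k) := by
  induction l using pvRuns.induct generalizing k with
  | case1 => simp [pvRuns]
  | case2 c =>
    simp only [pvRuns, List.headI_cons, List.length_singleton]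
    constructor
    · intro h
      have hke : k = 1 := by omega
      subst hke
      refine ⟨le_refl 1, ?_⟩
      simp
    · rintro ⟨h1, _⟩; omega
  | case3 a b t ih =>
    rw [pvRuns_cons_cons]
    have htake : ∀ k' : Nat, 2 ≤ k' → (a :: b :: t).take k' = a :: b :: t.take (k' - 2) := by
      intro k' hk'
      match k', hk' with
      | (k''+2), _ => simp
    by_cases hk1 : k = 1
    · subst hk1
      simp only [List.headI_cons, List.length_cons]
      constructor
      · intro _; exact ⟨by omega, by simp⟩
      · intro _
        split <;> omega
    · have hk2 : 2 ≤ k := by omega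
      rw [htake k hk2, List.isChain_cons_cons]
      by_cases hab : a = b
      · rw [if_neg (by simp [hab]), List.headI_cons]
        constructor
        · intro h; omega
        · rintro ⟨_, hne, _⟩; exact absurd hab hne
      · rw [if_pos hab, List.headI_cons]
        have hIH := ih (k - 1) (by omega)
        have hbtake : (b :: t).take (k - 1) = b :: t.take (k - 2) := by
          match k, hk2 with
          | (k''+2), _ => simp
        rw [hbtake] at hIH
        constructor
        · intro h
          obtain ⟨hlen, hch⟩ := hIH.mp (by omega)
          exact ⟨by simp only [List.length_cons] at hlen ⊢; omega, hab, hch⟩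
        · rintro ⟨hlen, _, hch⟩
          have : k - 1 ≤ (pvRuns (b :: t)).headI :=
            hIH.mpr ⟨by simp only [List.length_cons] at hlen ⊢; omega, hch⟩
          omega

theorem pvRuns_mem (l : List Char) (r : Nat) (hr : r ∈ pvRuns l) :
    1 ≤ r ∧ r ≤ l.length := by
  induction l using pvRuns.induct with
  | case1 => simp [pvRuns] at hr
  | case2 c => simp [pvRuns] at hr; simp [hr]
  | case3 a b t ih =>
    rw [pvRuns_cons_cons] at hr
    rcases List.mem_cons.mp hr with h | h
    · have := pvRuns_headI_le (b :: t)
      subst h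
      constructor
      · split <;> omega
      · simp only [List.length_cons] at *
        split <;> omega
    · have := ih h
      simp only [List.length_cons] at *
      omega

-- the number of valid starts A counts for one length L
def pvCountA (l : List Char) (L : Int) : Nat :=
  (PySem.List.pyRange 0 ((l.length : Int) - L + 1)).countP
    (fun i => pvIsValid (PySem.List.slice l (some i) (some (i + L))))

theorem countP_pyRange_shift (a b : Int) (p : Int → Bool) :
    (PySem.List.pyRange (a + 1) (b + 1)).countP p
      = (PySem.List.pyRange a b).countP (fun i => p (i + 1)) := by
  rw [PySem.List.pyRange_one (a + 1) (b + 1), PySem.List.pyRange_one a b,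
    List.countP_map, List.countP_map]
  have hn : (b + 1 - (a + 1)).toNat = (b - a).toNat := by omega
  rw [hn]
  apply List.countP_congr
  intro k _
  have : a + 1 + (k : Int) = a + (k : Int) + 1 := by ring
  simp only [Function.comp_apply, this]

-- For positive L, A's count of valid starts for length L equals the number of
-- run values ≥ L.
theorem pvCountA_eq (l : List Char) (L : Int) (hL : 1 ≤ L) :
    pvCountA l L = (pvRuns l).countP (fun r : Nat => decide (L ≤ (r : Int))) := by
  induction l generalizing L with
  | nil =>
    unfold pvCountA
    rw [PySem.List.pyRange_one_eq_nil (by simp; omega)]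
    rfl
  | cons a l' ih =>
    by_cases hn : L ≤ ((a :: l').length : Int)
    · unfold pvCountA
      have hlen : ((a :: l').length : Int) = (l'.length : Int) + 1 := by
        simp only [List.length_cons]; push_cast; ring
      rw [PySem.List.pyRange_one_cons (by omega)]
      rw [List.countP_cons]
      rw [pvRuns_cons_eq, List.countP_cons]
      have htail :
          (PySem.List.pyRange (0 + 1) (((a :: l').length : Int) - L + 1)).countP
              (fun i => pvIsValid (PySem.List.slice (a :: l') (some i) (some (i + L))))
            = pvCountA l' L := by
        have hb : ((a :: l').length : Int) - L + 1 = ((l'.length : Int) - L + 1) + 1 := by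
          rw [hlen]; ring
        rw [hb, countP_pyRange_shift]
        unfold pvCountA
        apply List.countP_congr
        intro i hi
        rw [PySem.List.mem_pyRange_one] at hi
        rw [PySem.List.slice_toNat _ (by omega) (by omega),
            PySem.List.slice_toNat _ (by omega) (by omega)]
        have h1 : (i + 1).toNat = i.toNat + 1 := by omega
        have h2 : (i + 1 + L).toNat - (i + 1).toNat = (i + L).toNat - i.toNat := by omega
        rw [h2, h1, List.drop_succ_cons]
      have hhead :
          (pvIsValid (PySem.List.slice (a :: l') (some 0) (some (0 + L))))
            = decide (L ≤ (((pvRuns (a :: l')).headI : Nat) : Int)) := by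
        rw [Bool.eq_iff_iff]
        have h0 : (0 : Int) + L = L := by ring
        rw [h0, PySem.List.slice_toNat _ (by omega) (by omega)]
        simp only [Int.toNat_zero, List.drop_zero, Nat.sub_zero]
        rw [pvIsValid_iff, decide_eq_true_iff]
        have hspec := pvRuns_head_spec (a :: l') L.toNat (by omega)
        constructor
        · intro hch
          have : L.toNat ≤ (pvRuns (a :: l')).headI := hspec.mpr ⟨by omega, hch⟩
          omega
        · intro hh
          exact (hspec.mp (by omega)).2
      rw [htail, hhead, ih L hL]
    · -- L exceeds the length: both sides are 0
      unfold pvCountA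
      rw [PySem.List.pyRange_one_eq_nil (by omega)]
      have : (pvRuns (a :: l')).countP (fun r : Nat => decide (L ≤ (r : Int))) = 0 := by
        rw [List.countP_eq_zero]
        intro r hr
        have := pvRuns_mem _ r hr
        simp only [decide_eq_true_iff, not_le]
        omega
      rw [this]
      rfl

-- the number of integers L with m ≤ L ≤ M and L ≤ c, as an Int-valued sum
theorem sum_indicator_range (m M c : Int) :
    ((PySem.List.pyRange m (M + 1)).map
        (fun L => if decide (L ≤ c) = true then (1 : Int) else 0)).sum
      = if m ≤ min M c then min M c - m + 1 else 0 := by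
  have key : ∀ (k : Nat) (M : Int), (M + 1 - m).toNat = k →
      ((PySem.List.pyRange m (M + 1)).map
          (fun L => if decide (L ≤ c) = true then (1 : Int) else 0)).sum
        = if m ≤ min M c then min M c - m + 1 else 0 := by
    intro k
    induction k with
    | zero =>
      intro M hM
      rw [PySem.List.pyRange_one_eq_nil (by omega)]
      simp only [List.map_nil, List.sum_nil]
      rw [if_neg (by omega)]
    | succ k ihk =>
      intro M hM
      rw [PySem.List.pyRange_one_succ_right (by omega), List.map_append, List.sum_append]
      have hM' : M = (M - 1) + 1 := by ring
      rw [show PySem.List.pyRange m M = PySem.List.pyRange m ((M - 1) + 1) from by rw [← hM'],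
        ihk (M - 1) (by omega)]
      simp only [List.map_cons, List.map_nil, List.sum_cons, List.sum_nil]
      simp only [decide_eq_true_eq]
      split_ifs <;> omega
  exact key (M + 1 - m).toNat M rfl

-- exchanging the two summations: summing per-length counts of long-enough runs
-- equals summing per-run counts of admissible lengths
theorem sum_swap_runs (rs : List Nat) (m M : Int) :
    ((PySem.List.pyRange m (M + 1)).map
        (fun L => ((rs.countP (fun r : Nat => decide (L ≤ (r : Int)))) : Int))).sum
      = (rs.map (fun r : Nat =>
          if m ≤ min M (r : Int) then min M (r : Int) - m + 1 else 0)).sum := by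
  induction rs with
  | nil =>
    simp
  | cons r rs ih =>
    simp only [List.countP_cons, List.map_cons, List.sum_cons]
    have hsplit :
        ((PySem.List.pyRange m (M + 1)).map
            (fun L => ((rs.countP (fun r' : Nat => decide (L ≤ (r' : Int)))
              + if decide (L ≤ (r : Int)) = true then 1 else 0 : Nat) : Int))).sum
          = ((PySem.List.pyRange m (M + 1)).map
              (fun L => ((rs.countP (fun r' : Nat => decide (L ≤ (r' : Int)))) : Int))).sum
            + ((PySem.List.pyRange m (M + 1)).map
              (fun L => if decide (L ≤ (r : Int)) = true then (1 : Int) else 0)).sum := by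
      rw [← PySem.List.sum_map_add_int]
      congr 1
      apply List.map_congr_left
      intro L _
      push_cast
      split_ifs <;> ring
    rw [hsplit, ih, sum_indicator_range]
    ring

-- Port A, written as a sum over the requested lengths
theorem A_as_sum (S : String) (m M : Int) :
    countValidSubstrings S m M
      = ((PySem.List.pyRange m (M + 1)).map
          (fun L => ((pvCountA S.toList L) : Int))).sum := by
  simp only [countValidSubstrings]
  rw [PySem.List.foldl_congr_mem _ _
      (fun count L => count + ((pvCountA S.toList L) : Int)) 0 ?_]
  · rw [PySem.List.foldl_add]; simp
  · intro acc L _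
    rw [PySem.List.foldl_count_if]
    unfold pvCountA
    rw [PySem.Str.len_eq]

-- Port B, written as a sum over the run values
theorem B_as_sum (S : String) (m M : Int) :
    countValidSubstrings_alt S m M
      = ((pvRuns S.toList).map (fun r : Nat =>
          if max m 1 ≤ min M (r : Int) then min M (r : Int) - max m 1 + 1 else 0)).sum := by
  simp only [countValidSubstrings_alt]
  rw [PySem.List.foldl_congr_mem (pvRuns S.toList) _
      (fun (count : Int) (r : Nat) => count +
        (if max m 1 ≤ min M (r : Int) then min M (r : Int) - max m 1 + 1 else 0)) 0 ?_]
  · rw [PySem.List.foldl_add (pvRuns S.toList)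
      (fun r : Nat => if max m 1 ≤ min M (r : Int) then min M (r : Int) - max m 1 + 1 else 0) 0]
    simp only [zero_add]
  · intro acc r _
    by_cases h : max m 1 ≤ min M (r : Int)
    · simp only [if_pos h]
    · simp only [if_neg h, add_zero]

-- A and B agree whenever some length ≥ 1 is requested (or the range is empty)
theorem AB_agree (S : String) (m M : Int) (h : 1 ≤ m ∨ M < m) :
    countValidSubstrings S m M = countValidSubstrings_alt S m M := by
  rw [A_as_sum, B_as_sum]
  rcases h with hm | hMm
  · have hmax : max m 1 = m := by omega
    have hmap : ∀ L ∈ PySem.List.pyRange m (M + 1),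
        ((pvCountA S.toList L) : Int)
          = (((pvRuns S.toList).countP (fun r : Nat => decide (L ≤ (r : Int)))) : Int) := by
      intro L hL
      have h1L : 1 ≤ L := le_trans hm (PySem.List.mem_pyRange_one.mp hL).1
      rw [pvCountA_eq S.toList L h1L]
    rw [hmax, List.map_congr_left hmap]
    exact sum_swap_runs (pvRuns S.toList) m M
  · rw [PySem.List.pyRange_one_eq_nil (by omega)]
    simp only [List.map_nil, List.sum_nil]
    symm
    have hmap : ∀ r ∈ pvRuns S.toList,
        (if max m 1 ≤ min M (r : Int) then min M (r : Int) - max m 1 + 1 else 0) = (0 : Int) := by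
      intro r _
      rw [if_neg (by omega)]
    rw [List.map_congr_left hmap]
    simp

-- each per-length count is ≥ 1 when L ≤ 0 (the empty slice at the last start is valid)
theorem pvCountA_pos (l : List Char) (L : Int) (hL : L ≤ 0) : 1 ≤ pvCountA l L := by
  unfold pvCountA
  rw [Nat.succ_le_iff]
  rw [List.countP_pos_iff]
  refine ⟨(l.length : Int) - L, ?_, ?_⟩
  · rw [PySem.List.mem_pyRange_one]
    omega
  · rw [PySem.List.slice_toNat _ (by omega) (by omega)]
    have hdrop : List.drop ((l.length : Int) - L).toNat l = [] := by
      apply List.drop_eq_nil_of_le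
      omega
    rw [hdrop, List.take_nil]
    rfl

-- ===== VERDICT (by name: the statement is the Claim_ definition above) =====
theorem countValidSubstrings_spec : Claim_unchanged_countValidSubstrings := by
  intro S m M _hDom
  unfold Spec_countValidSubstrings
  intro hnD
  unfold D_countValidSubstrings at hnD
  apply AB_agree
  by_cases hm : 1 ≤ m
  · exact Or.inl hm
  · refine Or.inr ?_
    by_contra h
    exact hnD ⟨by omega, by omega⟩
theorem countValidSubstrings_changed : Claim_changed_countValidSubstrings := by
  unfold Claim_changed_countValidSubstrings; decide
theorem countValidSubstrings_tight : Claim_exact_countValidSubstrings := by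
  unfold Claim_exact_countValidSubstrings
  intro S m M _hDom hD
  obtain ⟨hm0, hmM⟩ := hD
  rw [A_as_sum]
  set c : Int := min 1 (M + 1) with hc
  rw [PySem.List.pyRange_one_append m c (M + 1) (by omega) (by omega), List.map_append,
    List.sum_append]
  have hpart1 : 1 ≤ ((PySem.List.pyRange m c).map
      (fun L => ((pvCountA S.toList L) : Int))).sum := by
    have hmmem : m ∈ PySem.List.pyRange m c := by
      rw [PySem.List.mem_pyRange_one]; omega
    have hmem : ((pvCountA S.toList m : Nat) : Int) ∈ (PySem.List.pyRange m c).map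
        (fun L => ((pvCountA S.toList L) : Int)) := List.mem_map_of_mem hmmem
    have hnn : ∀ x ∈ (PySem.List.pyRange m c).map
        (fun L => ((pvCountA S.toList L) : Int)), 0 ≤ x := by
      intro x hx
      obtain ⟨L, _, hxe⟩ := List.mem_map.mp hx
      rw [← hxe]
      exact Int.natCast_nonneg _
    have h1 : 1 ≤ ((pvCountA S.toList m : Nat) : Int) := by
      exact_mod_cast pvCountA_pos S.toList m hm0
    exact le_trans h1 (List.single_le_sum hnn _ hmem)
  have hpart2 : ((PySem.List.pyRange c (M + 1)).map
      (fun L => ((pvCountA S.toList L) : Int))).sum = countValidSubstrings_alt S m M := by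
    by_cases hM : 1 ≤ M
    · have hc1 : c = 1 := by omega
      have hmax : max m 1 = 1 := by omega
      have hmap : ∀ L ∈ PySem.List.pyRange (1 : Int) (M + 1),
          ((pvCountA S.toList L) : Int)
            = (((pvRuns S.toList).countP (fun r : Nat => decide (L ≤ (r : Int)))) : Int) := by
        intro L hL
        rw [pvCountA_eq S.toList L (PySem.List.mem_pyRange_one.mp hL).1]
      rw [hc1, List.map_congr_left hmap, B_as_sum, hmax]
      exact sum_swap_runs (pvRuns S.toList) 1 M
    · have hc2 : c = M + 1 := by omega
      rw [hc2, PySem.List.pyRange_one_eq_nil le_rfl]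
      simp only [List.map_nil, List.sum_nil]
      rw [B_as_sum]
      have hmap : ∀ r ∈ pvRuns S.toList,
          (if max m 1 ≤ min M (r : Int) then min M (r : Int) - max m 1 + 1 else 0)
            = (0 : Int) := by
        intro r _
        rw [if_neg (by omega)]
      rw [List.map_congr_left hmap]
      symm
      simp
  rw [hpart2]
  intro heq
  omega
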